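-- pv_equiv track=rewrite | github.com/NECKTER/148_Homework | UDPserver.py | countBetweenSpace
-- ===== SOURCE A (Python) =====
-- def countBetweenSpace(message):
--     i = 0
--     result = ''
--     for ch in message:
--         if (chr(ch) == ' ') or (chr(ch) == '\n'):
--             if chr(ch) == '\n':
--                 result += '\n'
--             result += str(i) + ' '
--             i = 0
--         else:
--             i += 1
--     return result
-- ===== SOURCE B (Python) =====
-- def countBetweenSpace(message):
--     # split-based rewrite: cut the string into lines and chunks instead of a per-character counter
--     lines = ''.join(map(chr, message)).split('\n')
--     out = []
--     for line in lines[:-1]: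
--         cs = [str(len(chunk)) + ' ' for chunk in line.split(' ')]
--         out += cs[:-1]
--         out.append('\n' + cs[-1])
--     out += [str(len(chunk)) + ' ' for chunk in lines[-1].split(' ')][:-1]
--     return ''.join(out)
-- ===== Notes on version B (the rewrite author's own statement) =====
-- stated objective: alternative
-- what changed: Replaces the per-character counter state machine by building the string once, splitting it into lines and then space-chunks, and emitting one count per chunk boundary.
import Mathlib
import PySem

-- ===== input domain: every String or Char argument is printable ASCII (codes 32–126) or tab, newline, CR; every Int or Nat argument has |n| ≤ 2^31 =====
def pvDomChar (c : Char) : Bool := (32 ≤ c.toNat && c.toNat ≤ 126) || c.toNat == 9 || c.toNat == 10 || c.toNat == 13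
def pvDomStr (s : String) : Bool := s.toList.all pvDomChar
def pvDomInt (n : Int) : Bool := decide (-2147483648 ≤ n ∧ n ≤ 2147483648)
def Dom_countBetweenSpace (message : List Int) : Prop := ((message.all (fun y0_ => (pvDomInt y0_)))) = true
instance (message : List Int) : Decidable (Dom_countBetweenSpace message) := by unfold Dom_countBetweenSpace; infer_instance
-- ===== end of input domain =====

-- B replaces A's per-character counter loop by split-on-'\n'/split-on-' ' chunking; return values proved equal on Pre_ (no chr ValueError).

-- ===== PORT A =====
-- chr(ch) → Char.ofNat ch.toNat: exact for every non-surrogate code point admitted by Pre_;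
-- a surrogate code maps to '\x00', which — like Python's surrogate char — is neither ' ' nor '\n', so the comparison is exact.
def countBetweenSpace (message : List Int) : String :=
  let fin := message.foldl
    (fun (st : Int × List Char) ch =>
      let c := Char.ofNat ch.toNat
      if c = ' ' ∨ c = '\n' then
        let r := if c = '\n' then st.2 ++ ['\n'] else st.2
        (0, (r ++ PySem.Int.toChars st.1) ++ [' '])
      else (st.1 + 1, st.2))
    (0, [])
  String.mk fin.2

-- ===== PORT B =====
-- [str(len(chunk)) + ' ' for chunk in line.split(' ')]
def altCounts (line : List Char) : List (List Char) :=
  (PySem.Chars.splitOn line [' ']).map (fun chunk => PySem.Int.toChars (chunk.length : Int) ++ [' '])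

-- lines from str.split is always nonempty, so Python's lines[-1] is getLast!
def countBetweenSpace_alt (message : List Int) : String :=
  let lines := PySem.Chars.splitOn (message.map (fun ch => Char.ofNat ch.toNat)) ['\n']
  let out := lines.dropLast.foldl
    (fun out line =>
      let cs := altCounts line
      (out ++ cs.dropLast) ++ [['\n'] ++ cs.getLast!]) []
  let out := out ++ (altCounts lines.getLast!).dropLast
  String.mk (PySem.Chars.join [] out)

-- ===== PRECONDITION & SPEC =====
-- Pre_ excludes exactly the inputs on which Python's chr raises ValueError (codes outside range(0x110000)).
def Pre_countBetweenSpace (message : List Int) : Prop :=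
  ∀ ch ∈ message, 0 ≤ ch ∧ ch < 1114112
instance (message : List Int) : Decidable (Pre_countBetweenSpace message) := by
  unfold Pre_countBetweenSpace; infer_instance
def pvWitness_countBetweenSpace : List Int := [104, 105, 32, 10, 33]

def Spec_countBetweenSpace (message : List Int) (out : String) : Prop := out = countBetweenSpace_alt message
instance (message : List Int) (out : String) : Decidable (Spec_countBetweenSpace message out) := by unfold Spec_countBetweenSpace; infer_instance

-- ===== CLAIM (what is proved, stated in full; the proofs are below) =====
def Claim_equal_countBetweenSpace : Prop := ∀ (message : List Int), Dom_countBetweenSpace message → Pre_countBetweenSpace message → Spec_countBetweenSpace message (countBetweenSpace message)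

-- ===== LEMMAS AND PROOFS =====

-- the common emission order: one count per separator, '\n' prefixed before its count
def pvEmit : List Char → Int → List Char
  | [], _ => []
  | c :: rest, i =>
    if c = ' ' ∨ c = '\n' then
      (((if c = '\n' then ['\n'] else []) ++ PySem.Int.toChars i) ++ [' ']) ++ pvEmit rest 0
    else pvEmit rest (i + 1)

-- simple structural recursion computing split on a one-char separator
def pvSplit (d : Char) : List Char → List (List Char)
  | [] => [[]]
  | c :: s => if c = d then [] :: pvSplit d s else (pvSplit d s).modifyHead (c :: ·)

theorem pvSplit_ne_nil (d : Char) (l : List Char) : pvSplit d l ≠ [] := by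
  cases l with
  | nil => simp [pvSplit]
  | cons c s =>
    simp only [pvSplit]
    split
    · simp
    · cases h : pvSplit d s with
      | nil => exact absurd h (pvSplit_ne_nil d s)
      | cons a t => simp [List.modifyHead]

theorem splitOn_go_eq (d : Char) :
    ∀ (fuel : Nat) (l cur : List Char) (acc : List (List Char)), l.length < fuel →
      PySem.Chars.splitOn.go [d] fuel l cur acc
        = acc.reverse ++ (pvSplit d l).modifyHead (cur.reverse ++ ·) := by
  intro fuel
  induction fuel with
  | zero => intro l cur acc h; omega
  | succ f ih =>
    intro l cur acc h
    cases l with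
    | nil => simp [PySem.Chars.splitOn.go, pvSplit, List.modifyHead]
    | cons c rest =>
      rw [PySem.Chars.splitOn.go]
      have hlen : rest.length < f := by
        simp only [List.length_cons] at h; omega
      by_cases hc : c = d
      · rw [if_pos (by simp [List.isPrefixOf, hc]),
          show List.drop [d].length (c :: rest) = rest by simp,
          ih rest [] (cur.reverse :: acc) hlen]
        cases hsp : pvSplit d rest with
        | nil => exact absurd hsp (pvSplit_ne_nil d rest)
        | cons a t => simp [pvSplit, hc, hsp, List.modifyHead]
      · rw [if_neg (by simp [List.isPrefixOf]; exact fun h' => hc h'.symm),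
          ih rest (c :: cur) acc hlen]
        cases hsp : pvSplit d rest with
        | nil => exact absurd hsp (pvSplit_ne_nil d rest)
        | cons a t => simp [pvSplit, hc, hsp, List.modifyHead]

theorem splitOn_eq (d : Char) (l : List Char) :
    PySem.Chars.splitOn l [d] = pvSplit d l := by
  unfold PySem.Chars.splitOn
  rw [splitOn_go_eq d (l.length + 1) l [] [] (by omega)]
  cases hsp : pvSplit d l with
  | nil => exact absurd hsp (pvSplit_ne_nil d l)
  | cons a t => simp [List.modifyHead]

theorem pvSplit_prefix (d : Char) (pre l : List Char) (h : ∀ c ∈ pre, c ≠ d) :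
    pvSplit d (pre ++ l) = (pvSplit d l).modifyHead (pre ++ ·) := by
  induction pre with
  | nil =>
    cases hsp : pvSplit d l with
    | nil => exact absurd hsp (pvSplit_ne_nil d l)
    | cons a t => rw [List.nil_append, hsp]; simp [List.modifyHead]
  | cons c p ih =>
    have hc : c ≠ d := h c (by simp)
    simp only [List.cons_append, pvSplit, if_neg hc]
    rw [ih (fun x hx => h x (by simp [hx]))]
    cases hsp : pvSplit d l with
    | nil => exact absurd hsp (pvSplit_ne_nil d l)
    | cons a t => simp [List.modifyHead]

theorem join_nil_eq_flatten (parts : List (List Char)) :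
    PySem.Chars.join [] parts = parts.flatten := by
  induction parts with
  | nil => simp [PySem.Chars.join, List.intercalate]
  | cons a t ih =>
    cases t with
    | nil => simp [PySem.Chars.join, List.intercalate]
    | cons b t' =>
      simp only [PySem.Chars.join, List.intercalate, List.intersperse] at ih ⊢
      simp only [List.flatten] at ih ⊢
      simp [ih]

theorem altCounts_ne_nil (line : List Char) : altCounts line ≠ [] := by
  unfold altCounts
  rw [splitOn_eq]
  cases hsp : pvSplit ' ' line with
  | nil => exact absurd hsp (pvSplit_ne_nil ' ' line)
  | cons a t => simp

-- the pure list form of B's loop body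
def pvG (lines : List (List Char)) : List Char :=
  ((lines.dropLast.flatMap (fun line =>
      (altCounts line).dropLast ++ [['\n'] ++ (altCounts line).getLast!]))
   ++ (altCounts lines.getLast!).dropLast).flatten

theorem alt_eq_pvG (message : List Int) :
    countBetweenSpace_alt message
      = String.mk (pvG (pvSplit '\n' (message.map (fun ch => Char.ofNat ch.toNat)))) := by
  unfold countBetweenSpace_alt pvG
  dsimp only []
  rw [splitOn_eq, join_nil_eq_flatten]
  congr 2
  simp only [List.append_assoc]
  rw [PySem.List.foldl_append_eq_flatMap
    (fun line => (altCounts line).dropLast ++ [['\n'] ++ (altCounts line).getLast!])]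
  simp

theorem altCounts_prefix_space (pre l : List Char) (h : ∀ c ∈ pre, c ≠ ' ') :
    altCounts (pre ++ ' ' :: l)
      = (PySem.Int.toChars (pre.length : Int) ++ [' ']) :: altCounts l := by
  unfold altCounts
  rw [splitOn_eq, splitOn_eq]
  have : pvSplit ' ' (pre ++ ' ' :: l) = pre :: pvSplit ' ' l := by
    rw [pvSplit_prefix ' ' pre (' ' :: l) h]
    simp [pvSplit, List.modifyHead]
  rw [this]
  simp

theorem altCounts_no_sep (pre : List Char) (h : ∀ c ∈ pre, c ≠ ' ') :
    altCounts pre = [PySem.Int.toChars (pre.length : Int) ++ [' ']] := by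
  unfold altCounts
  rw [splitOn_eq]
  have : pvSplit ' ' pre = [pre] := by
    rw [show pre = pre ++ [] by simp, pvSplit_prefix ' ' pre [] h]
    simp [pvSplit, List.modifyHead]
  rw [this]; simp

theorem pvGetLast!_singleton (a : List Char) : [a].getLast! = a := rfl
theorem pvGetLast!_cons₂ (a b : List Char) (t : List (List Char)) :
    (a :: b :: t).getLast! = (b :: t).getLast! := rfl

-- prepending a space-chunk to the first line prepends its count
theorem pvG_space_cons (pre L0 : List Char) (Ls : List (List Char))
    (h : ∀ c ∈ pre, c ≠ ' ') :
    pvG ((pre ++ ' ' :: L0) :: Ls)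
      = (PySem.Int.toChars (pre.length : Int) ++ [' ']) ++ pvG (L0 :: Ls) := by
  cases Ls with
  | nil =>
    simp only [pvG, List.dropLast_singleton, List.flatMap_nil, List.nil_append,
      pvGetLast!_singleton]
    rw [altCounts_prefix_space pre L0 h]
    cases hc : altCounts L0 with
    | nil => exact absurd hc (altCounts_ne_nil L0)
    | cons a t => simp
  | cons y ys =>
    simp only [pvG, List.dropLast_cons₂, List.flatMap_cons, pvGetLast!_cons₂]
    rw [altCounts_prefix_space pre L0 h]
    cases hc : altCounts L0 with
    | nil => exact absurd hc (altCounts_ne_nil L0)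
    | cons a t => simp

-- prepending a separator-free line prepends '\n' and its count
theorem pvG_newline_cons (pre L0 : List Char) (Ls : List (List Char))
    (h : ∀ c ∈ pre, c ≠ ' ') :
    pvG (pre :: L0 :: Ls)
      = (['\n'] ++ (PySem.Int.toChars (pre.length : Int) ++ [' '])) ++ pvG (L0 :: Ls) := by
  simp only [pvG, List.dropLast_cons₂, List.flatMap_cons, pvGetLast!_cons₂]
  rw [altCounts_no_sep pre h]
  simp

theorem pvG_emit (l : List Char) :
    ∀ pre : List Char, (∀ c ∈ pre, c ≠ ' ' ∧ c ≠ '\n') →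
      pvG (pvSplit '\n' (pre ++ l)) = pvEmit l (pre.length : Int) := by
  induction l with
  | nil =>
    intro pre h
    have : pvSplit '\n' (pre ++ []) = [pre] := by
      rw [pvSplit_prefix '\n' pre [] (fun c hc => (h c hc).2)]
      simp [pvSplit, List.modifyHead]
    rw [this]
    simp only [pvG, List.dropLast_singleton, List.flatMap_nil, List.nil_append,
      pvGetLast!_singleton]
    rw [altCounts_no_sep pre (fun c hc => (h c hc).1)]
    simp [pvEmit]
  | cons c rest ih =>
    intro pre h
    by_cases hn : c = '\n'
    · subst hn
      have : pvSplit '\n' (pre ++ '\n' :: rest) = pre :: pvSplit '\n' rest := by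
        rw [pvSplit_prefix '\n' pre ('\n' :: rest) (fun c hc => (h c hc).2)]
        simp [pvSplit, List.modifyHead]
      rw [this]
      cases hL : pvSplit '\n' rest with
      | nil => exact absurd hL (pvSplit_ne_nil '\n' rest)
      | cons L0 Ls =>
        have hrest : pvG (L0 :: Ls) = pvEmit rest 0 := by
          have h0 := ih [] (by simp)
          rw [List.nil_append, hL] at h0
          simpa using h0
        rw [pvG_newline_cons pre L0 Ls (fun c hc => (h c hc).1), hrest]
        simp [pvEmit]
    · by_cases hs : c = ' '
      · subst hs
        have : pvSplit '\n' (pre ++ ' ' :: rest)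
            = (pvSplit '\n' (' ' :: rest)).modifyHead (pre ++ ·) :=
          pvSplit_prefix '\n' pre (' ' :: rest) (fun c hc => (h c hc).2)
        rw [this]
        simp only [pvSplit, if_neg (by decide : ¬ (' ' = '\n'))]
        cases hL : pvSplit '\n' rest with
        | nil => exact absurd hL (pvSplit_ne_nil '\n' rest)
        | cons L0 Ls =>
          simp only [List.modifyHead]
          rw [pvG_space_cons pre L0 Ls (fun c hc => (h c hc).1)]
          have hrest : pvG (L0 :: Ls) = pvEmit rest 0 := by
            have h0 := ih [] (by simp)
            rw [List.nil_append, hL] at h0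
            simpa using h0
          rw [hrest]
          simp [pvEmit]
      · have hif : ¬(c = ' ' ∨ c = '\n') := not_or.mpr ⟨hs, hn⟩
        have heq : pre ++ c :: rest = (pre ++ [c]) ++ rest := by simp
        rw [heq, ih (pre ++ [c]) (by
          intro x hx
          rcases List.mem_append.mp hx with hx | hx
          · exact h x hx
          · simp at hx; subst hx; exact ⟨hs, hn⟩)]
        simp only [pvEmit, if_neg hif]
        congr 1
        simp only [List.length_append, List.length_cons, List.length_nil]
        push_cast
        ring

theorem a_fold (l : List Int) :
    ∀ (i : Int) (acc : List Char),
      (l.foldl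
        (fun (st : Int × List Char) ch =>
          let c := Char.ofNat ch.toNat
          if c = ' ' ∨ c = '\n' then
            let r := if c = '\n' then st.2 ++ ['\n'] else st.2
            (0, (r ++ PySem.Int.toChars st.1) ++ [' '])
          else (st.1 + 1, st.2))
        (i, acc)).2
      = acc ++ pvEmit (l.map (fun ch => Char.ofNat ch.toNat)) i := by
  induction l with
  | nil => simp [pvEmit]
  | cons ch rest ih =>
    intro i acc
    simp only [List.foldl_cons, List.map_cons, pvEmit]
    by_cases hsep : Char.ofNat ch.toNat = ' ' ∨ Char.ofNat ch.toNat = '\n'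
    · rw [if_pos hsep]
      by_cases hn : Char.ofNat ch.toNat = '\n'
      · simp only [if_pos hsep, if_pos hn, ih]
        simp
      · simp only [if_pos hsep, if_neg hn, ih]
        simp
    · simp only [if_neg hsep, ih]

-- ===== VERDICT (by name: the statement is the Claim_ definition above) =====
theorem countBetweenSpace_spec : Claim_equal_countBetweenSpace := by
  intro message _ _
  unfold Spec_countBetweenSpace countBetweenSpace
  rw [alt_eq_pvG]
  have hB := pvG_emit (message.map (fun ch => Char.ofNat ch.toNat)) [] (by simp)
  simp only [List.nil_append, List.length_nil, Int.ofNat_zero] at hB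
  have hA := a_fold message 0 []
  simp only [List.nil_append] at hA
  simp only [hA]
  rw [hB]
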